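-- pv_equiv track=rewrite | github.com/weijie-zhong/rigorous-proof | scripts/context.py | _prune_status_log
-- ===== SOURCE A (Python) =====
-- STATUS_LOG_KEEP = 5
--
-- def _prune_status_log(text: str) -> str:
--     """
--     Keep only the last STATUS_LOG_KEEP iteration entries.
--
--     Entries are delimited by lines starting with `## Iteration `. Anything
--     before the first such header (e.g. a file-level title) is dropped from
--     the cached view; the full file stays untouched on disk.
--     """
--     marker = "\n## Iteration "
--     # Normalize so an entry at the very top is also detected
--     scan = "\n" + text
--     positions = []
--     start = 0
--     while True:
--         idx = scan.find(marker, start)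
--         if idx == -1:
--             break
--         positions.append(idx)
--         start = idx + 1
--
--     if not positions:
--         return text
--
--     if len(positions) <= STATUS_LOG_KEEP:
--         kept_start = positions[0]
--     else:
--         kept_start = positions[-STATUS_LOG_KEEP]
--
--     # +1 to skip the leading "\n" we prepended for scanning
--     return scan[kept_start + 1:].lstrip("\n")
-- ===== SOURCE B (Python) =====
-- STATUS_LOG_KEEP = 5
--
-- def _prune_status_log(text: str) -> str:
--     marker = "\n## Iteration "
--     parts = ("\n" + text).split(marker)
--     if len(parts) == 1:
--         return text
--     kept = parts[1:][-STATUS_LOG_KEEP:]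
--     return marker.join([""] + kept).lstrip("\n")
-- ===== Notes on version B (the rewrite author's own statement) =====
-- stated objective: simpler
-- what changed: A scans the text with a position-index find loop, collects all marker offsets and slices the raw string at the chosen offset; B splits the normalized text on the marker once, keeps the last 5 entry bodies with a list slice and rejoins them with the marker.
import Mathlib
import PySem

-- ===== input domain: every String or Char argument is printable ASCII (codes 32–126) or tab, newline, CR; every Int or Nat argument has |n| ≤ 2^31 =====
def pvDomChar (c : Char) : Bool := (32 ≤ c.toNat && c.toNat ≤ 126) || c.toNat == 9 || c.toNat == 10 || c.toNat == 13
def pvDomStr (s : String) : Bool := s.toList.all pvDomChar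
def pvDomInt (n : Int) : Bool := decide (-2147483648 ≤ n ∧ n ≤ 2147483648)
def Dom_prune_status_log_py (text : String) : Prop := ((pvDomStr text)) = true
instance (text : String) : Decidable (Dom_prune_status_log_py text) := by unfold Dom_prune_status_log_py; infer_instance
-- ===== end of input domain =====

-- B replaces A's position-index find loop by one split on the marker, a slice of the
-- last 5 entries and a rejoin (objective: simpler).

-- "\n## Iteration " , the entry delimiter both Pythons use
def pruneMarkerL : List Char :=
  ['\n', '#', '#', ' ', 'I', 't', 'e', 'r', 'a', 't', 'i', 'o', 'n', ' ']

-- exact port of str.lstrip("\n"): drop leading '\n' characters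
def lstripNl (l : List Char) : List Char := l.dropWhile (· == '\n')

theorem findFrom_of_gt (s : List Char) (k : Nat) (hk : s.length < k) :
    PySem.Chars.findFrom s pruneMarkerL (k : Int) = -1 := by
  have h0 : ¬ ((k : Int) < 0) := by omega
  simp only [PySem.Chars.findFrom, h0, if_false]
  rw [if_pos (by omega : (s.length : Int) < (k : Int))]

-- used by findPositions' termination proof (cited in decreasing_by)
theorem pv_findFrom_lt (s : List Char) (start : Nat)
    (h : PySem.Chars.findFrom s pruneMarkerL (start : Int) ≠ -1) :
    start ≤ (PySem.Chars.findFrom s pruneMarkerL (start : Int)).toNat ∧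
      (PySem.Chars.findFrom s pruneMarkerL (start : Int)).toNat < s.length := by
  by_cases hk : start ≤ s.length
  · obtain ⟨h1, h2, -⟩ := PySem.Chars.findFrom_natCast_spec s pruneMarkerL start hk h
    have hlen := h2.length_le
    have h14 : pruneMarkerL.length = 14 := rfl
    rw [h14, List.length_drop] at hlen
    omega
  · exact absurd (findFrom_of_gt s start (by omega)) h

-- ===== PORT A =====
-- the while-loop collecting every marker position in scan (restart at idx+1);
-- idx is appended only after the `idx == -1` test, so `.toNat` is exact here
def findPositions (scan : List Char) (start : Nat) : List Nat :=
  let idx := PySem.Chars.findFrom scan pruneMarkerL (start : Int)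
  if h : idx = -1 then []
  else idx.toNat :: findPositions scan (idx.toNat + 1)
termination_by scan.length + 1 - start
decreasing_by
  have := pv_findFrom_lt scan start h
  omega

def prune_status_log_py (text : String) : String :=
  let scan := '\n' :: text.toList
  let positions := findPositions scan 0
  if positions = [] then text
  else
    -- len(positions) <= STATUS_LOG_KEEP → positions[0], else positions[-STATUS_LOG_KEEP]
    let kept_start := if positions.length ≤ 5 then PySem.List.pyGetD positions 0 0
                      else PySem.List.pyGetD positions (-5) 0
    -- scan[kept_start + 1:].lstrip("\n")  (kept_start+1 ≥ 0, so the slice is a drop)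
    String.mk (lstripNl (scan.drop (kept_start + 1)))

-- ===== PORT B =====
def prune_status_log_py_alt (text : String) : String :=
  let scan := '\n' :: text.toList
  let parts := PySem.Chars.splitOn scan pruneMarkerL
  if parts.length = 1 then text
  else
    -- kept = parts[1:][-STATUS_LOG_KEEP:]
    let kept := PySem.List.slice (PySem.List.slice parts (some 1) none) (some (-5)) none
    -- marker.join([""] + kept).lstrip("\n")
    String.mk (lstripNl (PySem.Chars.join pruneMarkerL ([] :: kept)))

-- ===== PRECONDITION & SPEC =====
def Spec_prune_status_log_py (text : String) (out : String) : Prop := out = prune_status_log_py_alt text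
instance (text : String) (out : String) : Decidable (Spec_prune_status_log_py text out) := by unfold Spec_prune_status_log_py; infer_instance

-- ===== CLAIM (what is proved, stated in full; the proofs are below) =====
def Claim_equal_prune_status_log_py : Prop := ∀ (text : String), Dom_prune_status_log_py text → Spec_prune_status_log_py text (prune_status_log_py text)

-- ===== LEMMAS AND PROOFS =====

-- `occ s j` ⇔ an occurrence of the marker starts at index j of s
def occ (s : List Char) (j : Nat) : Prop := pruneMarkerL <+: s.drop j

theorem occ_infix {s : List Char} {j : Nat} (h : occ s j) : pruneMarkerL <:+: s :=
  h.isInfix.trans (s.drop_suffix j).isInfix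

theorem occ_len {s : List Char} {j : Nat} (h : occ s j) : j + 14 ≤ s.length := by
  have h1 := h.length_le
  have h2 : pruneMarkerL.length = 14 := rfl
  rw [h2, List.length_drop] at h1
  omega

theorem occ_drop {s : List Char} (c j : Nat) : occ (s.drop c) j ↔ occ s (c + j) := by
  unfold occ
  rw [List.drop_drop, Nat.add_comm]

-- the marker has no nonempty border: two occurrences cannot overlap
theorem occ_no_overlap {s : List Char} {i j : Nat} (hi : occ s i) (hj : occ s j)
    (hij : i < j) : i + 14 ≤ j := by
  by_contra hlt
  have hd : j - i ≤ 13 := by omega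
  have hd1 : 1 ≤ j - i := by omega
  obtain ⟨t, ht⟩ := hi
  have hsj : s.drop j = pruneMarkerL.drop (j - i) ++ t := by
    have : s.drop j = (s.drop i).drop (j - i) := by
      rw [List.drop_drop]; congr 1; omega
    rw [this, ← ht, List.drop_append_of_le_length (by simp [pruneMarkerL]; omega)]
  have hlen : 0 < (pruneMarkerL.drop (j - i)).length := by
    simp only [List.length_drop]
    have : pruneMarkerL.length = 14 := rfl
    omega
  obtain ⟨t2, ht2⟩ := hj
  have hh : (pruneMarkerL ++ t2)[0]? = (List.drop (j - i) pruneMarkerL ++ t)[0]? := by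
    rw [ht2, hsj]
  rw [List.getElem?_append_left (by simp [pruneMarkerL]),
      List.getElem?_append_left hlen, List.getElem?_drop] at hh
  set d := j - i with hdd
  interval_cases d <;> simp [pruneMarkerL] at hh

-- characterization of Chars.find on the marker
theorem find_eq_natCast_iff (u : List Char) (k : Nat) :
    PySem.Chars.find u pruneMarkerL = (k : Int) ↔ (occ u k ∧ ∀ j < k, ¬ occ u j) := by
  constructor
  · intro h
    have h0 : 0 ≤ PySem.Chars.find u pruneMarkerL := by rw [h]; exact Int.natCast_nonneg k
    obtain ⟨h1, h2⟩ := PySem.Chars.find_spec h0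
    rw [h, Int.toNat_natCast] at h1 h2
    exact ⟨h1, fun j hj => h2 j hj⟩
  · rintro ⟨hk, hmin⟩
    have h0 : 0 ≤ PySem.Chars.find u pruneMarkerL :=
      (PySem.Chars.find_nonneg_iff u pruneMarkerL).mpr (occ_infix hk)
    obtain ⟨h1, h2⟩ := PySem.Chars.find_spec h0
    have : (PySem.Chars.find u pruneMarkerL).toNat = k := by
      rcases Nat.lt_trichotomy (PySem.Chars.find u pruneMarkerL).toNat k with h | h | h
      · exact absurd h1 (hmin _ h)
      · exact h
      · exact absurd hk (h2 k h)
    omega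

theorem find_eq_neg_one_iff' (u : List Char) :
    PySem.Chars.find u pruneMarkerL = -1 ↔ ∀ j, ¬ occ u j := by
  rw [PySem.Chars.find_eq_neg_one_iff]
  constructor
  · intro h j hj
    exact h (occ_infix hj)
  · intro h hin
    obtain ⟨j, hj⟩ := (PySem.Chars.exists_prefix_drop_iff_isIn pruneMarkerL u).mpr
      ((PySem.Chars.isIn_iff_infix _ _).mpr hin)
    exact h j hj

-- findFrom from offset start+c in s = findFrom from offset start in s.drop c, shifted
theorem findFrom_shift (s : List Char) (c : Nat) (hc : c ≤ s.length) (start : Nat) :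
    PySem.Chars.findFrom s pruneMarkerL ((start + c : Nat) : Int) =
      if PySem.Chars.findFrom (s.drop c) pruneMarkerL (start : Int) = -1 then -1
      else PySem.Chars.findFrom (s.drop c) pruneMarkerL (start : Int) + c := by
  by_cases hs : start ≤ (s.drop c).length
  · have hsc : start + c ≤ s.length := by
      rw [List.length_drop] at hs; omega
    rw [PySem.Chars.findFrom_natCast s pruneMarkerL (start + c) hsc,
        PySem.Chars.findFrom_natCast (s.drop c) pruneMarkerL start hs,
        List.drop_drop, Nat.add_comm c start]
    by_cases hA : PySem.Chars.find (List.drop (start + c) s) pruneMarkerL = -1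
    · simp [hA]
    · have h0 : 0 ≤ PySem.Chars.find (List.drop (start + c) s) pruneMarkerL := by
        have := PySem.Chars.neg_one_le_find (List.drop (start + c) s) pruneMarkerL
        omega
      rw [if_neg hA, if_neg (by omega), if_neg hA]
      push_cast
      ring
  · rw [List.length_drop] at hs
    rw [findFrom_of_gt s (start + c) (by omega),
        findFrom_of_gt (s.drop c) start (by rw [List.length_drop]; omega)]
    simp

-- the find loop ignores an occurrence-free window: start may be moved forward across it
theorem fp_skip (s : List Char) (a b : Nat) (hab : a ≤ b) (hb : b ≤ s.length)
    (hno : ∀ j, a ≤ j → j < b → ¬ occ s j) :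
    findPositions s a = findPositions s b := by
  have ha : a ≤ s.length := by omega
  by_cases hA : PySem.Chars.find (s.drop b) pruneMarkerL = -1
  · have hnb := (find_eq_neg_one_iff' (s.drop b)).mp hA
    have hna : PySem.Chars.find (s.drop a) pruneMarkerL = -1 := by
      rw [find_eq_neg_one_iff']
      intro j hj
      rw [occ_drop] at hj
      by_cases hjb : a + j < b
      · exact hno (a + j) (by omega) hjb hj
      · refine hnb (a + j - b) ?_
        rw [occ_drop]
        have e : b + (a + j - b) = a + j := by omega
        rw [e]; exact hj
    conv_lhs => rw [findPositions]
    conv_rhs => rw [findPositions]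
    rw [PySem.Chars.findFrom_natCast s pruneMarkerL a ha,
        PySem.Chars.findFrom_natCast s pruneMarkerL b hb, hna, hA]
    simp
  · have h0 : 0 ≤ PySem.Chars.find (s.drop b) pruneMarkerL := by
      have := PySem.Chars.neg_one_le_find (s.drop b) pruneMarkerL
      omega
    set k := (PySem.Chars.find (s.drop b) pruneMarkerL).toNat with hk
    have hfb : PySem.Chars.find (s.drop b) pruneMarkerL = (k : Int) := by omega
    obtain ⟨hocc, hmin⟩ := (find_eq_natCast_iff (s.drop b) k).mp hfb
    rw [occ_drop] at hocc
    have hfa : PySem.Chars.find (s.drop a) pruneMarkerL = ((b + k - a : Nat) : Int) := by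
      rw [find_eq_natCast_iff]
      constructor
      · rw [occ_drop]
        have e : a + (b + k - a) = b + k := by omega
        rw [e]; exact hocc
      · intro j hj hjo
        rw [occ_drop] at hjo
        by_cases hjb : a + j < b
        · exact hno (a + j) (by omega) hjb hjo
        · refine hmin (a + j - b) (by omega) ?_
          rw [occ_drop]
          have e : b + (a + j - b) = a + j := by omega
          rw [e]; exact hjo
    conv_lhs => rw [findPositions]
    conv_rhs => rw [findPositions]
    rw [PySem.Chars.findFrom_natCast s pruneMarkerL a ha,
        PySem.Chars.findFrom_natCast s pruneMarkerL b hb, hfa, hfb]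
    have e1 : (a : Int) + ((b + k - a : Nat) : Int) = ((b + k : Nat) : Int) := by push_cast; omega
    have e2 : (b : Int) + (k : Int) = ((b + k : Nat) : Int) := by push_cast; omega
    rw [if_neg (show ¬(((b + k - a : Nat) : Int) = -1) by omega),
        if_neg (show ¬((k : Int) = -1) by omega), e1, e2]

-- positions found from offset start+c in s = positions found from start in s.drop c, shifted
theorem fp_shift (s : List Char) (c : Nat) (hc : c ≤ s.length) :
    ∀ start, findPositions s (start + c) = (findPositions (s.drop c) start).map (· + c) := by
  intro start
  induction hn : (s.drop c).length + 1 - start using Nat.strong_induction_on generalizing start with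
  | _ n ih =>
    conv_lhs => rw [findPositions]
    conv_rhs => rw [findPositions]
    rw [findFrom_shift s c hc start]
    by_cases hA : PySem.Chars.findFrom (s.drop c) pruneMarkerL (start : Int) = -1
    · simp [hA]
    · obtain ⟨hge, hlt⟩ := pv_findFrom_lt (s.drop c) start hA
      have hsl : start ≤ (s.drop c).length := by
        by_contra hcon
        exact hA (findFrom_of_gt (s.drop c) start (by omega))
      obtain ⟨hgeI, -, -⟩ := PySem.Chars.findFrom_natCast_spec (s.drop c) pruneMarkerL start hsl hA
      set r := PySem.Chars.findFrom (s.drop c) pruneMarkerL (start : Int) with hr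
      have h0 : 0 ≤ r := le_trans (Int.natCast_nonneg start) hgeI
      rw [if_neg hA, dif_neg (show ¬(r + (c : Int) = -1) by omega), dif_neg hA]
      have htn : (r + (c : Int)).toNat = r.toNat + c := by omega
      simp only [List.map_cons]
      rw [htn]
      congr 1
      have e3 : r.toNat + c + 1 = (r.toNat + 1) + c := by omega
      have hrec := ih ((s.drop c).length + 1 - (r.toNat + 1)) (by omega) (r.toNat + 1) rfl
      rw [e3, hrec]

-- one step of A's loop, phrased on the suffix past the first occurrence
theorem fp_step (s : List Char) (i : Nat)
    (hf : PySem.Chars.find s pruneMarkerL = (i : Int)) :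
    findPositions s 0 = i :: (findPositions (s.drop (i + 14)) 0).map (· + (i + 14)) := by
  obtain ⟨hocc, hmin⟩ := (find_eq_natCast_iff s i).mp hf
  have hi14 : i + 14 ≤ s.length := occ_len hocc
  conv_lhs => rw [findPositions]
  have hff : PySem.Chars.findFrom s pruneMarkerL ((0 : Nat) : Int) = (i : Int) := by
    rw [Nat.cast_zero, PySem.Chars.findFrom_zero, hf]
  rw [hff, dif_neg (show ¬((i : Int) = -1) by omega), Int.toNat_natCast]
  congr 1
  rw [fp_skip s (i + 1) (i + 14) (by omega) hi14
    (fun j hj1 hj2 hjo => by have := occ_no_overlap hocc hjo (by omega); omega)]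
  have := fp_shift s (i + 14) hi14 0
  rw [Nat.zero_add] at this
  exact this

theorem fp_nil (s : List Char) (hf : PySem.Chars.find s pruneMarkerL = -1) :
    findPositions s 0 = [] := by
  rw [findPositions]
  have hff : PySem.Chars.findFrom s pruneMarkerL ((0 : Nat) : Int) = -1 := by
    rw [Nat.cast_zero, PySem.Chars.findFrom_zero, hf]
  rw [hff]
  simp

-- B side: a direct recursive description of Chars.splitOn on the marker
def mySplit (l : List Char) (cur : List Char) : List (List Char) :=
  match l with
  | [] => [cur.reverse]
  | c :: rest =>
    if pruneMarkerL.isPrefixOf (c :: rest) then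
      cur.reverse :: mySplit ((c :: rest).drop 14) []
    else
      mySplit rest (c :: cur)
termination_by l.length
decreasing_by all_goals (simp; try omega)

theorem mySplit_ne_nil : ∀ (l cur : List Char), mySplit l cur ≠ [] := by
  intro l
  induction hn : l.length using Nat.strong_induction_on generalizing l with
  | _ n ih =>
    intro cur
    rcases l with _ | ⟨c, rest⟩
    · rw [mySplit]; simp
    · simp only [List.length_cons] at hn
      rw [mySplit]
      split
      · simp
      · exact ih rest.length (by omega) rest rfl (c :: cur)

theorem go_eq : ∀ (n : Nat) (l cur : List Char) (acc : List (List Char)), l.length < n →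
    PySem.Chars.splitOn.go pruneMarkerL n l cur acc = acc.reverse ++ mySplit l cur := by
  intro n
  induction n with
  | zero => intro l cur acc h; omega
  | succ n ih =>
    intro l cur acc h
    match l with
    | [] =>
      rw [show PySem.Chars.splitOn.go pruneMarkerL (n + 1) [] cur acc
            = (cur.reverse :: acc).reverse from rfl, mySplit]
      simp
    | c :: rest =>
      rw [show PySem.Chars.splitOn.go pruneMarkerL (n + 1) (c :: rest) cur acc
            = if pruneMarkerL.isPrefixOf (c :: rest) then
                PySem.Chars.splitOn.go pruneMarkerL n (List.drop pruneMarkerL.length (c :: rest)) []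
                  (cur.reverse :: acc)
              else PySem.Chars.splitOn.go pruneMarkerL n rest (c :: cur) acc from rfl,
          mySplit]
      simp only [List.length_cons] at h
      split
      · rw [ih _ _ _ (by simp [pruneMarkerL]; omega)]
        simp [pruneMarkerL]
      · rw [ih _ _ _ (by omega)]

theorem splitOn_eq (s : List Char) :
    PySem.Chars.splitOn s pruneMarkerL = mySplit s [] := by
  rw [show PySem.Chars.splitOn s pruneMarkerL
        = PySem.Chars.splitOn.go pruneMarkerL (s.length + 1) s [] [] from rfl,
      go_eq (s.length + 1) s [] [] (by omega)]
  simp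

theorem join_mySplit : ∀ (l cur : List Char),
    PySem.Chars.join pruneMarkerL (mySplit l cur) = cur.reverse ++ l := by
  intro l
  induction hn : l.length using Nat.strong_induction_on generalizing l with
  | _ n ih =>
    intro cur
    rcases l with _ | ⟨c, rest⟩
    · rw [mySplit, PySem.Chars.join_singleton]; simp
    · simp only [List.length_cons] at hn
      rw [mySplit]
      split
      · rename_i hpre
        obtain ⟨t, ht⟩ := List.isPrefixOf_iff_prefix.mp hpre
        obtain ⟨q, qs, hq⟩ : ∃ q qs, mySplit ((c :: rest).drop 14) [] = q :: qs := by
          rcases hmy : mySplit ((c :: rest).drop 14) [] with _ | ⟨q, qs⟩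
          · exact absurd hmy (mySplit_ne_nil _ _)
          · exact ⟨q, qs, rfl⟩
        rw [hq, PySem.Chars.join_cons_cons, ← hq,
            ih ((c :: rest).drop 14).length (by simp; omega) _ rfl []]
        have h14 : pruneMarkerL.length = 14 := rfl
        rw [List.reverse_nil, List.nil_append, List.append_assoc]
        congr 1
        rw [show (c :: rest).drop 14 = (c :: rest).drop pruneMarkerL.length from rfl, ← ht,
            List.drop_left]
      · rename_i hpre
        rw [ih rest.length (by omega) rest rfl (c :: cur)]
        simp

theorem mySplit_nil : ∀ (l : List Char), (∀ j, ¬ occ l j) → ∀ (cur : List Char),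
    mySplit l cur = [cur.reverse ++ l] := by
  intro l
  induction hn : l.length using Nat.strong_induction_on generalizing l with
  | _ n ih =>
    intro hf cur
    rcases l with _ | ⟨c, rest⟩
    · rw [mySplit]; simp
    · simp only [List.length_cons] at hn
      rw [mySplit]
      split
      · rename_i hpre
        exact absurd (show occ (c :: rest) 0 from by
          unfold occ
          simpa using List.isPrefixOf_iff_prefix.mp hpre) (hf 0)
      · rw [ih rest.length (by omega) rest rfl
          (fun j hj => hf (j + 1) (by unfold occ at hj ⊢; simpa using hj)) (c :: cur)]
        simp

theorem mySplit_step : ∀ (l : List Char) (i : Nat) (cur : List Char),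
    PySem.Chars.find l pruneMarkerL = (i : Int) →
    mySplit l cur = (cur.reverse ++ l.take i) :: mySplit (l.drop (i + 14)) [] := by
  intro l
  induction hn : l.length using Nat.strong_induction_on generalizing l with
  | _ n ih =>
    intro i cur hf
    obtain ⟨hocc, hmin⟩ := (find_eq_natCast_iff l i).mp hf
    rcases l with _ | ⟨c, rest⟩
    · exact absurd hocc.length_le (by simp [pruneMarkerL])
    · simp only [List.length_cons] at hn
      rw [mySplit]
      split
      · rename_i hpre
        have hi0 : i = 0 := by
          by_contra hne
          exact hmin 0 (by omega) (by
            unfold occ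
            simpa using List.isPrefixOf_iff_prefix.mp hpre)
        subst hi0
        simp
      · rename_i hpre
        obtain ⟨i', rfl⟩ : ∃ i', i = i' + 1 := by
          refine ⟨i - 1, ?_⟩
          rcases Nat.eq_zero_or_pos i with h0 | h0
          · subst h0
            exact absurd (by
              rw [List.isPrefixOf_iff_prefix]
              simpa [occ] using hocc) hpre
          · omega
        have hf' : PySem.Chars.find rest pruneMarkerL = (i' : Int) := by
          rw [find_eq_natCast_iff]
          constructor
          · unfold occ at hocc ⊢
            simpa [List.drop_succ_cons] using hocc
          · intro j hj hjo
            exact hmin (j + 1) (by omega) (by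
              unfold occ at hjo ⊢
              simpa [List.drop_succ_cons] using hjo)
        rw [ih rest.length (by omega) rest rfl i' (c :: cur) hf']
        simp [List.drop_succ_cons]

-- the joint correspondence between A's position list and B's part list
theorem main_corr : ∀ (s : List Char),
    (mySplit s []).length = (findPositions s 0).length + 1 ∧
    ∀ j (h : j < (findPositions s 0).length),
      s.drop ((findPositions s 0)[j]) =
        pruneMarkerL ++ PySem.Chars.join pruneMarkerL ((mySplit s []).drop (j + 1)) := by
  intro s
  induction hn : s.length using Nat.strong_induction_on generalizing s with
  | _ n ih =>
    by_cases hA : PySem.Chars.find s pruneMarkerL = -1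
    · rw [fp_nil s hA, mySplit_nil s ((find_eq_neg_one_iff' s).mp hA) []]
      exact ⟨by simp, by intro j hj; simp at hj⟩
    · have h0 : 0 ≤ PySem.Chars.find s pruneMarkerL := by
        have := PySem.Chars.neg_one_le_find s pruneMarkerL
        omega
      set i := (PySem.Chars.find s pruneMarkerL).toNat with hi
      have hf : PySem.Chars.find s pruneMarkerL = (i : Int) := by omega
      have hstep := fp_step s i hf
      have hbstep := mySplit_step s i [] hf
      obtain ⟨hocc, -⟩ := (find_eq_natCast_iff s i).mp hf
      have hi14 := occ_len hocc
      obtain ⟨ihl, ihj⟩ := ih (s.drop (i + 14)).length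
        (by rw [← hn, List.length_drop]; omega) (s.drop (i + 14)) rfl
      have hdec : s.drop i = pruneMarkerL ++ s.drop (i + 14) := by
        obtain ⟨t, ht⟩ := hocc
        have h14 : pruneMarkerL.length = 14 := rfl
        have htt : t = s.drop (i + 14) := by
          have h2 := congrArg (List.drop pruneMarkerL.length) ht
          rw [List.drop_left, List.drop_drop, h14] at h2
          exact h2
        rw [← ht, htt]
      rw [hstep, hbstep]
      refine ⟨by simp [ihl], ?_⟩
      intro j hj
      simp only [List.length_cons, List.length_map] at hj
      match j with
      | 0 =>
        simp only [List.getElem_cons_zero, List.drop_succ_cons, List.drop_zero]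
        rw [hdec]
        congr 1
        rw [join_mySplit]
        simp
      | Nat.succ j =>
        have hj' : j < (findPositions (s.drop (i + 14)) 0).length := by omega
        have hrec := ihj j hj'
        simp only [List.getElem_cons_succ, List.getElem_map, List.drop_succ_cons]
        rw [Nat.add_comm ((findPositions (s.drop (i + 14)) 0)[j]) (i + 14),
            ← List.drop_drop, hrec]

theorem slice_last5 {α : Type} (t : List α) :
    PySem.List.slice t (some (-5)) none = t.drop (t.length - min 5 t.length) := by
  simp only [PySem.List.slice, PySem.List.clampIdx]
  by_cases h : t.length < 5
  · rw [if_pos (by omega : (-5 : Int) < 0), if_pos (by omega)]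
    have hm : t.length - min 5 t.length = 0 := by omega
    rw [hm]
    simp
  · rw [if_pos (by omega : (-5 : Int) < 0), if_neg (by omega)]
    have ha : ((t.length : Int) + -5).toNat = t.length - 5 := by omega
    rw [ha]
    rw [List.take_of_length_le (by simp)]
    congr 1
    omega

-- ===== VERDICT (by name: the statement is the Claim_ definition above) =====
theorem prune_status_log_py_spec : Claim_equal_prune_status_log_py := by
  intro text _
  unfold Spec_prune_status_log_py prune_status_log_py prune_status_log_py_alt
  dsimp only
  obtain ⟨hlen, hjj⟩ := main_corr ('\n' :: text.toList)
  rw [splitOn_eq]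
  set scan := '\n' :: text.toList with hscan
  set pos := findPositions scan 0 with hpos
  set P := mySplit scan [] with hP
  by_cases hnil : pos = []
  · rw [if_pos hnil, if_pos (by rw [hlen, hnil]; rfl)]
  · have hn1 : 0 < pos.length := List.length_pos_of_ne_nil hnil
    have hPne : ¬ P.length = 1 := by rw [hlen]; omega
    rw [if_neg hnil, if_neg hPne]
    set j := pos.length - min 5 pos.length with hj
    have hjn : j < pos.length := by omega
    have hks : (if pos.length ≤ 5 then PySem.List.pyGetD pos 0 0
        else PySem.List.pyGetD pos (-5) 0) = pos[j]'hjn := by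
      by_cases h5 : pos.length ≤ 5
      · rw [if_pos h5, PySem.List.pyGetD_zero, List.getD_eq_getElem pos 0 (by omega)]
        congr 1
        omega
      · rw [if_neg h5, PySem.List.pyGetD_neg_ofNat pos 5 0 (by omega) (by omega)]
        congr 1
        omega
    rw [hks]
    have hkept : PySem.List.slice (PySem.List.slice P (some 1) none) (some (-5)) none
        = P.drop (j + 1) := by
      rw [PySem.List.slice_from P (by omega : (0 : Int) ≤ 1), slice_last5]
      have hl1 : (P.drop (1 : Int).toNat).length = pos.length := by
        rw [List.length_drop, hlen]
        rfl
      rw [hl1, show (1 : Int).toNat = 1 from rfl, List.drop_drop]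
      congr 1
      omega
    rw [hkept]
    obtain ⟨q, qs, hq⟩ : ∃ q qs, P.drop (j + 1) = q :: qs := by
      rcases hcase : P.drop (j + 1) with _ | ⟨q, qs⟩
      · exfalso
        have := congrArg List.length hcase
        rw [List.length_drop, hlen] at this
        simp at this
        omega
      · exact ⟨q, qs, rfl⟩
    have hdrop := hjj j hjn
    have hstep : scan.drop (pos[j]'hjn + 1)
        = pruneMarkerL.tail ++ PySem.Chars.join pruneMarkerL (P.drop (j + 1)) := by
      rw [← List.drop_drop, hdrop]
      rfl
    rw [hstep, hq, PySem.Chars.join_cons_cons]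
    congr 1
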